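-- pv_equiv track=rewrite | github.com/Enot3811/Leet_code | yandex/algorithms_2024/task_2D.py | task_list
-- ===== SOURCE A (Python) =====
-- def task_list(diff: int, tasks: list[int]) -> int:
--     tasks.sort()
--     n_days = 0
--     left = 0
--     right = 0
--     while right < len(tasks):
--         if tasks[right] - tasks[left] <= diff:
--             right += 1
--             n_days = max(n_days, right - left)
--         else:
--             left += 1
--     return n_days
-- ===== SOURCE B (Python) =====
-- def task_list(diff: int, tasks: list[int]) -> int:
--     # Per-element binary search instead of a sliding window: for each right,
--     # find the leftmost index j (in [0, right]) whose value is >= tasks[right] - diff;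
--     # the best window ending at right has length right - j + 1.
--     tasks.sort()
--     n_days = 0
--     for right in range(len(tasks)):
--         target = tasks[right] - diff
--         lo, hi = 0, right
--         while lo < hi:
--             mid = (lo + hi) // 2
--             if tasks[mid] < target:
--                 lo = mid + 1
--             else:
--                 hi = mid
--         n_days = max(n_days, right - lo + 1)
--     return n_days
-- ===== Notes on version B (the rewrite author's own statement) =====
-- stated objective: alternative
-- what changed: Replaced the amortized two-pointer sliding window with an independent per-element binary search (hand-written bisect_left) for the leftmost index within diff of tasks[right]; the in-place sort is kept.
import Mathlib
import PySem

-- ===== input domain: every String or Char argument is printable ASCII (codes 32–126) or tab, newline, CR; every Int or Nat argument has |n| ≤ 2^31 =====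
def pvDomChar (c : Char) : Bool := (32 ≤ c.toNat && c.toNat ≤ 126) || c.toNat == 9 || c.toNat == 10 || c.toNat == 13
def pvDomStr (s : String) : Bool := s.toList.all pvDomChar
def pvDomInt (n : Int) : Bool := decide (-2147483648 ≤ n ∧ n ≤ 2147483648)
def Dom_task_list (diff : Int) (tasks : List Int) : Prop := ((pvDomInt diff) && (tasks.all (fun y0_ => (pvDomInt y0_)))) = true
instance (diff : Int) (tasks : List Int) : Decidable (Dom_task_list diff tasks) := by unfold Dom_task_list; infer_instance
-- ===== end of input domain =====

-- B replaces A's amortized two-pointer sliding window by a per-element binary search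
-- (bisect_left) for the leftmost index keeping the value range ≤ diff (objective: alternative).
-- Both versions sort the argument list in place, the same mutation; equivalence here is about the return value.

-- ===== PORT A =====
-- A's while-loop; fuel = 2*len+2 suffices on Pre_ (l ≤ r ≤ len, l+r grows each step).
-- Indexing is total via getD 0; Python's IndexError inputs (diff < 0, nonempty list) are excluded by Pre_.
def loopA (s : List Int) (diff : Int) : Nat → Int → Nat → Nat → Int
  | 0, n, _, _ => n
  | fuel+1, n, l, r =>
    if r < s.length then
      if s.getD r 0 - s.getD l 0 ≤ diff then
        loopA s diff fuel (max n ((r : Int) + 1 - (l : Int))) l (r + 1)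
      else
        loopA s diff fuel n (l + 1) r
    else n

def task_list (diff : Int) (tasks : List Int) : Int :=
  let s := PySem.List.sorted tasks (fun x => x) false
  loopA s diff (2 * s.length + 2) 0 0 0

-- ===== PORT B =====
-- hand-written bisect_left from Source B: leftmost index in [lo, hi) whose value is ≥ x
def bs (s : List Int) (x : Int) (lo hi : Nat) : Nat :=
  if lo < hi then
    if s.getD ((lo + hi) / 2) 0 < x then bs s x ((lo + hi) / 2 + 1) hi
    else bs s x lo ((lo + hi) / 2)
  else lo
termination_by hi - lo
decreasing_by all_goals omega

def task_list_alt (diff : Int) (tasks : List Int) : Int :=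
  let s := PySem.List.sorted tasks (fun x => x) false
  (List.range s.length).foldl
    (fun (n : Int) (m : Nat) => max n ((m : Int) - (bs s (s.getD m 0 - diff) 0 m : Int) + 1)) 0

-- ===== PRECONDITION & SPEC =====
-- Pre_ excludes exactly the inputs where A raises IndexError: with diff < 0 and a nonempty
-- list the left pointer runs past the end of the list.
def Pre_task_list (diff : Int) (tasks : List Int) : Prop := 0 ≤ diff ∨ tasks = []
instance (diff : Int) (tasks : List Int) : Decidable (Pre_task_list diff tasks) := by unfold Pre_task_list; infer_instance
def pvWitness_task_list : Int × List Int := (1, [3, 1, 2])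
def Spec_task_list (diff : Int) (tasks : List Int) (out : Int) : Prop := out = task_list_alt diff tasks
instance (diff : Int) (tasks : List Int) (out : Int) : Decidable (Spec_task_list diff tasks out) := by unfold Spec_task_list; infer_instance

-- ===== CLAIM (what is proved, stated in full; the proofs are below) =====
def Claim_equal_task_list : Prop := ∀ (diff : Int) (tasks : List Int), Dom_task_list diff tasks → Pre_task_list diff tasks → Spec_task_list diff tasks (task_list diff tasks)

-- ===== LEMMAS AND PROOFS =====

-- binary-search invariant: given a valid lower/upper frontier, bs lands on the boundary
lemma bs_spec (s : List Int) (x : Int)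
    (hmono : ∀ p q : Nat, p ≤ q → q < s.length → s.getD p 0 ≤ s.getD q 0) :
    ∀ k lo hi, hi - lo = k → lo ≤ hi → hi ≤ s.length →
    (∀ i < lo, s.getD i 0 < x) →
    (∀ i, hi ≤ i → i < s.length → x ≤ s.getD i 0) →
    lo ≤ bs s x lo hi ∧ bs s x lo hi ≤ hi ∧
    (∀ i < bs s x lo hi, s.getD i 0 < x) ∧
    (∀ i, bs s x lo hi ≤ i → i < s.length → x ≤ s.getD i 0) := by
  intro k
  induction k using Nat.strong_induction_on with
  | _ k ih =>
    intro lo hi hk hlh hhl hlow hhigh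
    rw [bs]
    by_cases h1 : lo < hi
    · simp only [h1, if_true]
      by_cases h2 : s.getD ((lo + hi) / 2) 0 < x
      · simp only [h2, if_true]
        have := ih (hi - ((lo + hi) / 2 + 1)) (by omega) ((lo + hi) / 2 + 1) hi rfl
          (by omega) hhl
          (by intro i hi'
              have : s.getD i 0 ≤ s.getD ((lo + hi) / 2) 0 := hmono i _ (by omega) (by omega)
              omega)
          hhigh
        exact ⟨by omega, this.2.1, this.2.2.1, this.2.2.2⟩
      · simp only [h2, if_false]
        have := ih ((lo + hi) / 2 - lo) (by omega) lo ((lo + hi) / 2) rfl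
          (by omega) (by omega) hlow
          (by intro i hi' hil
              have : s.getD ((lo + hi) / 2) 0 ≤ s.getD i 0 := hmono _ i hi' hil
              omega)
        exact ⟨this.1, by omega, this.2.2.1, this.2.2.2⟩
    · simp only [h1, if_false]
      have hlo : lo = hi := by omega
      exact ⟨le_refl _, by omega, hlow, by intro i h _; exact hhigh i (by omega) ‹_›⟩

-- the step function of B's fold
lemma loopA_eq (s : List Int) (diff : Int) (hd : 0 ≤ diff)
    (hmono : ∀ p q : Nat, p ≤ q → q < s.length → s.getD p 0 ≤ s.getD q 0) :
    ∀ fuel l r n, l ≤ r → r ≤ s.length → 2 * s.length + 1 ≤ fuel + (l + r) →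
    (r < s.length → ∀ i < l, s.getD i 0 < s.getD r 0 - diff) →
    loopA s diff fuel n l r =
      (List.range' r (s.length - r)).foldl
        (fun (n : Int) (m : Nat) => max n ((m : Int) - (bs s (s.getD m 0 - diff) 0 m : Int) + 1)) n := by
  intro fuel
  induction fuel with
  | zero => intro l r n hlr hrl hfuel _; omega
  | succ fuel ih =>
    intro l r n hlr hrl hfuel hinv
    rw [loopA]
    by_cases hr : r < s.length
    · simp only [hr, if_true]
      by_cases hc : s.getD r 0 - s.getD l 0 ≤ diff
      · simp only [hc, if_true]
        -- at the moment the window [l..r] is accepted, l is exactly bisect_left(s, s[r]-diff)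
        have hbs := bs_spec s (s.getD r 0 - diff) hmono r 0 r rfl (by omega) (by omega)
          (by intro i hi; omega)
          (by intro i hi hil
              have := hmono r i hi hil
              omega)
        have hjl : bs s (s.getD r 0 - diff) 0 r = l := by
          rcases Nat.lt_trichotomy (bs s (s.getD r 0 - diff) 0 r) l with h | h | h
          · have h1 := hinv hr _ h
            have h2 := hbs.2.2.2 _ (le_refl _) (by omega)
            omega
          · exact h
          · have h1 := hbs.2.2.1 l h
            omega
        have hrange : s.length - r = (s.length - (r + 1)) + 1 := by omega
        rw [hrange, List.range'_succ, List.foldl_cons]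
        rw [ih l (r + 1) _ (by omega) (by omega) (by omega)
          (by intro hr1 i hi
              have h1 := hinv hr i hi
              have h2 := hmono r (r + 1) (by omega) hr1
              omega)]
        congr 1
        rw [hjl]
        omega
      · simp only [hc, if_false]
        have hlr' : l < r := by
          rcases Nat.lt_or_ge l r with h | h
          · exact h
          · exfalso; have : l = r := by omega
            subst this; omega
        rw [ih (l + 1) r n (by omega) hrl (by omega)
          (by intro hr' i hi
              rcases Nat.lt_or_ge i l with h | h
              · exact hinv hr' i h
              · have : i = l := by omega
                subst this; omega)]
    · simp only [hr, if_false]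
      have : s.length - r = 0 := by omega
      rw [this]
      simp
-- monotonicity of the sorted list through getD
lemma sorted_getD_mono (tasks : List Int) :
    ∀ p q : Nat, p ≤ q → q < (PySem.List.sorted tasks (fun x => x) false).length →
      (PySem.List.sorted tasks (fun x => x) false).getD p 0 ≤
      (PySem.List.sorted tasks (fun x => x) false).getD q 0 := by
  intro p q hpq hq
  rw [List.getD_eq_getElem _ _ (by omega), List.getD_eq_getElem _ _ hq]
  exact PySem.List.sorted_id_getElem_mono tasks hpq hq

-- ===== VERDICT (by name: the statement is the Claim_ definition above) =====
theorem task_list_spec : Claim_equal_task_list := by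
  intro diff tasks _ hpre
  unfold Spec_task_list task_list task_list_alt
  show loopA (PySem.List.sorted tasks (fun x => x) false) diff
      (2 * (PySem.List.sorted tasks (fun x => x) false).length + 2) 0 0 0 =
    (List.range (PySem.List.sorted tasks (fun x => x) false).length).foldl
      (fun (n : Int) (m : Nat) => max n ((m : Int) -
        (bs (PySem.List.sorted tasks (fun x => x) false)
          ((PySem.List.sorted tasks (fun x => x) false).getD m 0 - diff) 0 m : Int) + 1)) 0
  rcases hpre with hd | hnil
  · rw [loopA_eq _ diff hd (sorted_getD_mono tasks) _ 0 0 0 (by omega) (by omega) (by omega)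
      (by intro _ i hi; omega)]
    rw [List.range_eq_range', Nat.sub_zero]
  · subst hnil
    rfl
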